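-- pv_equiv track=rewrite | github.com/Melodiz/dailycode | Algorithms/some_intern_contests/yandex_winter/B_Vasia_and_kittens/naive_brute.py | can_place_entities_naive
-- ===== SOURCE A (Python) =====
-- from itertools import combinations
--
-- def can_place_entities_naive(n, bed_coords, occupied_beds, min_dist):
--     # Convert occupied beds to a set for quick lookup
--     occupied_set = set(occupied_beds)
--
--     # Calculate available beds by excluding occupied ones
--     available_beds = [bed for bed in bed_coords if bed not in occupied_set]
--
--     cats_to_place = n
--
--     # Generate all combinations of placing the cats_to_place on available beds
--     for combo in combinations(available_beds, cats_to_place):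
--         # Combine the occupied beds with the current combination
--         all_cats = list(combo) + occupied_beds
--
--         # Sort the positions of all cats
--         all_cats.sort()
--
--         # Calculate the minimum distance between any two cats
--         min_distance = min(all_cats[i+1] - all_cats[i] for i in range(len(all_cats) - 1))
--
--         # Check if the minimum distance is at least min_dist
--         if min_distance >= min_dist:
--             return True
--
--     return False
-- ===== SOURCE B (Python) =====
-- def can_place_entities_naive(n, bed_coords, occupied_beds, min_dist):
--     # Occupied beds must already respect the spacing among themselves.
--     occ = sorted(occupied_beds)
--     for x, y in zip(occ, occ[1:]):
--         if y - x < min_dist: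
--             return False
--     occ_set = set(occupied_beds)
--     avail = sorted(b for b in bed_coords if b not in occ_set)
--     # Greedy left-to-right placement: place a cat on the leftmost bed that is
--     # far enough from the previously fixed point and from the next occupied bed.
--     placed = 0
--     last = None  # last fixed position (placed cat or occupied bed already passed)
--     i = 0        # index of the first occupied bed to the right
--     for b in avail:
--         while i < len(occ) and occ[i] <= b:
--             last = occ[i]
--             i += 1
--         if (last is None or last + min_dist <= b) and (i == len(occ) or b + min_dist <= occ[i]):
--             placed += 1
--             last = b
--     return placed >= n
-- ===== Notes on version B (the rewrite author's own statement) =====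
-- stated objective: faster
-- what changed: Replaces the C(m,n) enumeration of all combinations (each sorted and gap-checked) by a single greedy left-to-right sweep over the sorted available beds that respects the occupied positions, after one linear feasibility check of the occupied beds themselves.
-- crash fix: A raises ValueError when n < 0 (combinations with negative r) or when n + len(occupied_beds) <= 1 while n beds are still available (min() over an empty gap generator); B just returns whether n cats fit (trivially true for at most one cat in total). — e.g. on can_place_entities_naive(1, [3], [], 2): A raises ValueError, B returns true
import Mathlib
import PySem

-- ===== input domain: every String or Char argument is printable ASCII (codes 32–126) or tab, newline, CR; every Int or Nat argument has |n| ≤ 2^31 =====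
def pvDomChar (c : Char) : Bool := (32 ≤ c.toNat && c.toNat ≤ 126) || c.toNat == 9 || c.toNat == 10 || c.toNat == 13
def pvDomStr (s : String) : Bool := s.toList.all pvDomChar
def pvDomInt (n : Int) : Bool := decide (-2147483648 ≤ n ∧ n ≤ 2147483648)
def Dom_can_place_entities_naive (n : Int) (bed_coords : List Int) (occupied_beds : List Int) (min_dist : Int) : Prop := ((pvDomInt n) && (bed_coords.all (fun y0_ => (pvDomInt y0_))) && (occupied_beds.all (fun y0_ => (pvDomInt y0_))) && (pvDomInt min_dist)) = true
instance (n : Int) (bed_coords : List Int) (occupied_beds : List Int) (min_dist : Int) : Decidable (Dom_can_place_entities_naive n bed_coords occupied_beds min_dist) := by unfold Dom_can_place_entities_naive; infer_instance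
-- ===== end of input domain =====

-- B replaces A's enumeration of all n-element combinations of the available beds by one greedy
-- left-to-right sweep over the sorted available beds (asymptotically faster; return value only).

-- ===== PORT A =====
-- itertools.combinations(l, k) in emission order (lexicographic by index)
def pvCombos : List Int → Nat → List (List Int)
  | _, 0 => [[]]
  | [], _ + 1 => []
  | x :: xs, k + 1 => ((pvCombos xs k).map (fun c => x :: c)) ++ pvCombos xs (k + 1)

-- the generator (all_cats[i+1] - all_cats[i] for i in range(len(all_cats) - 1))
def pvGaps (all_cats : List Int) : List Int :=
  (PySem.List.pyRange 0 ((all_cats.length : Int) - 1) 1).map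
    (fun i => PySem.List.pyGetD all_cats (i + 1) 0 - PySem.List.pyGetD all_cats i 0)

-- min(gaps) >= min_dist; Python's min() raises ValueError on an empty generator — that
-- input is excluded by Pre_ below, so the `none` branch is unreachable there.
def pvCheck (all_cats : List Int) (min_dist : Int) : Bool :=
  match PySem.List.min? (pvGaps all_cats) (fun x => x) with
  | none => false
  | some m => decide (min_dist ≤ m)

def can_place_entities_naive (n : Int) (bed_coords : List Int) (occupied_beds : List Int) (min_dist : Int) : Bool :=
  let occupied_set : PySem.Set Int := PySem.Set.ofList occupied_beds
  let available_beds := bed_coords.filter (fun bed => !(PySem.Set.contains occupied_set bed))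
  -- combinations(available_beds, n): n.toNat is exact for 0 ≤ n (Pre_; Python raises ValueError for n < 0)
  (pvCombos available_beds n.toNat).any (fun combo =>
    pvCheck (PySem.List.sorted (combo ++ occupied_beds) (fun x => x)) min_dist)

-- ===== PORT B =====
-- the inner `while i < len(occ) and occ[i] <= b` loop: consume occupied beds ≤ b, tracking `last`
def pvAdv : List Int → Int → Option Int → List Int × Option Int
  | [], _, last => ([], last)
  | o :: os, b, last => if o ≤ b then pvAdv os b (some o) else (o :: os, last)

-- the `for b in avail` greedy sweep, returning the number of cats placed
def pvGreedy (d : Int) : List Int → List Int → Option Int → Nat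
  | [], _, _ => 0
  | b :: bs, occ, last =>
    let s := pvAdv occ b last
    if (s.2.all fun a => decide (a + d ≤ b)) && (s.1.head?.all fun o => decide (b + d ≤ o)) then
      pvGreedy d bs s.1 (some b) + 1
    else
      pvGreedy d bs s.1 s.2

def can_place_entities_naive_alt (n : Int) (bed_coords : List Int) (occupied_beds : List Int) (min_dist : Int) : Bool :=
  let occ := PySem.List.sorted occupied_beds (fun x => x)
  if (occ.zip occ.tail).any (fun p => decide (p.2 - p.1 < min_dist)) then false
  else
    let occ_set : PySem.Set Int := PySem.Set.ofList occupied_beds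
    let avail := PySem.List.sorted (bed_coords.filter (fun b => !(PySem.Set.contains occ_set b))) (fun x => x)
    decide (n ≤ (pvGreedy min_dist avail occ none : Int))

-- ===== PRECONDITION & SPEC =====
-- Pre_ excludes exactly the inputs on which Python A raises ValueError: n < 0 (combinations with a
-- negative r), and n + len(occupied_beds) <= 1 while at least n beds are available (the first
-- combination then reaches min() over an empty generator).
def Pre_can_place_entities_naive (n : Int) (bed_coords : List Int) (occupied_beds : List Int) (min_dist : Int) : Prop :=
  0 ≤ n ∧ (2 ≤ n + (occupied_beds.length : Int) ∨
           ((bed_coords.filter (fun b => decide (b ∉ occupied_beds))).length : Int) < n)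
instance (n : Int) (bed_coords : List Int) (occupied_beds : List Int) (min_dist : Int) : Decidable (Pre_can_place_entities_naive n bed_coords occupied_beds min_dist) := by unfold Pre_can_place_entities_naive; infer_instance

def pvWitness_can_place_entities_naive : Int × List Int × List Int × Int := (1, [0, 5], [9], 3)

-- A raises ValueError when n < 0, or when n + len(occupied_beds) <= 1 while at least n beds are
-- available; B just returns whether n cats fit (trivially true for at most one cat in total).
def Raises_can_place_entities_naive (n : Int) (bed_coords : List Int) (occupied_beds : List Int) (min_dist : Int) : Prop :=
  n < 0 ∨ (0 ≤ n ∧ n + (occupied_beds.length : Int) ≤ 1 ∧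
           n ≤ ((bed_coords.filter (fun b => decide (b ∉ occupied_beds))).length : Int))
instance (n : Int) (bed_coords : List Int) (occupied_beds : List Int) (min_dist : Int) : Decidable (Raises_can_place_entities_naive n bed_coords occupied_beds min_dist) := by unfold Raises_can_place_entities_naive; infer_instance

def pvRaiseWitness_can_place_entities_naive : Int × List Int × List Int × Int := (1, [3], [], 2)
def pvRaiseWitnessOut_can_place_entities_naive : Bool := true

def Spec_can_place_entities_naive (n : Int) (bed_coords : List Int) (occupied_beds : List Int) (min_dist : Int) (out : Bool) : Prop := out = can_place_entities_naive_alt n bed_coords occupied_beds min_dist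
instance (n : Int) (bed_coords : List Int) (occupied_beds : List Int) (min_dist : Int) (out : Bool) : Decidable (Spec_can_place_entities_naive n bed_coords occupied_beds min_dist out) := by unfold Spec_can_place_entities_naive; infer_instance

-- ===== CLAIM (what is proved, stated in full; the proofs are below) =====
def Claim_equal_can_place_entities_naive : Prop := ∀ (n : Int) (bed_coords : List Int) (occupied_beds : List Int) (min_dist : Int), Dom_can_place_entities_naive n bed_coords occupied_beds min_dist → Pre_can_place_entities_naive n bed_coords occupied_beds min_dist → Spec_can_place_entities_naive n bed_coords occupied_beds min_dist (can_place_entities_naive n bed_coords occupied_beds min_dist)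

def Claim_raises_can_place_entities_naive : Prop := (∀ (n : Int) (bed_coords : List Int) (occupied_beds : List Int) (min_dist : Int), Dom_can_place_entities_naive n bed_coords occupied_beds min_dist → Raises_can_place_entities_naive n bed_coords occupied_beds min_dist → ¬ Pre_can_place_entities_naive n bed_coords occupied_beds min_dist) ∧ (Dom_can_place_entities_naive (pvRaiseWitness_can_place_entities_naive.1) (pvRaiseWitness_can_place_entities_naive.2.1) (pvRaiseWitness_can_place_entities_naive.2.2.1) (pvRaiseWitness_can_place_entities_naive.2.2.2) ∧ Raises_can_place_entities_naive (pvRaiseWitness_can_place_entities_naive.1) (pvRaiseWitness_can_place_entities_naive.2.1) (pvRaiseWitness_can_place_entities_naive.2.2.1) (pvRaiseWitness_can_place_entities_naive.2.2.2) ∧ can_place_entities_naive_alt (pvRaiseWitness_can_place_entities_naive.1) (pvRaiseWitness_can_place_entities_naive.2.1) (pvRaiseWitness_can_place_entities_naive.2.2.1) (pvRaiseWitness_can_place_entities_naive.2.2.2) = pvRaiseWitnessOut_can_place_entities_naive)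

-- ===== LEMMAS AND PROOFS =====

-- comparison function used for List.merge in the proofs
def pvLe : Int → Int → Bool := fun a b => decide (a ≤ b)
-- "a may immediately precede b in a sorted placement with gap d" (transitive strengthening of the gap)
def pvR (d : Int) (a b : Int) : Prop := a ≤ b ∧ (d ≤ 0 ∨ a + d ≤ b)
def pvC (d : Int) (l : List Int) : Prop := List.IsChain (pvR d) l

def pvRtrans (d : Int) : Trans (pvR d) (pvR d) (pvR d) :=
  ⟨fun h1 h2 => ⟨le_trans h1.1 h2.1, by rcases h1 with ⟨a1, b1 | c1⟩ <;> rcases h2 with ⟨a2, b2 | c2⟩ <;> omega⟩⟩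

theorem pvC_sublist {d : Int} {l₁ l₂ : List Int} (hs : l₁.Sublist l₂) (h : pvC d l₂) : pvC d l₁ :=
  @List.IsChain.sublist _ _ _ _ (pvRtrans d) h hs

theorem pvC_pairwise {d : Int} {l : List Int} (h : pvC d l) : List.Pairwise (pvR d) l :=
  (@List.isChain_iff_pairwise _ _ _ (pvRtrans d)).mp h

theorem isChain_and {α : Type} {R S : α → α → Prop} : ∀ {l : List α},
    List.IsChain R l → List.IsChain S l → List.IsChain (fun a b => R a b ∧ S a b) l := by
  intro l h1 h2
  induction l with
  | nil => exact List.IsChain.nil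
  | cons a l ih =>
    cases l with
    | nil => exact List.isChain_singleton _
    | cons b t =>
      rw [List.isChain_cons_cons] at h1 h2 ⊢
      exact ⟨⟨h1.1, h2.1⟩, ih h1.2 h2.2⟩

theorem pvC_of_gap {d : Int} {l : List Int} (hs : List.Pairwise (· ≤ ·) l)
    (h : List.IsChain (fun a b => a + d ≤ b) l) : pvC d l := by
  have hle : List.IsChain (fun a b : Int => a ≤ b) l := hs.isChain
  exact (isChain_and hle h).imp (fun a b hab => ⟨hab.1, Or.inr hab.2⟩)

theorem gap_of_pvC {d : Int} {l : List Int} (h : pvC d l) :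
    List.IsChain (fun a b => a + d ≤ b) l := by
  exact h.imp (fun a b hab => by rcases hab with ⟨h1, h2 | h2⟩ <;> omega)

theorem sorted_subperm_sublist : ∀ {l₂ l₁ : List Int}, l₁.Subperm l₂ →
    List.Pairwise (· ≤ ·) l₁ → List.Pairwise (· ≤ ·) l₂ → l₁.Sublist l₂ := by
  intro l2
  induction l2 with
  | nil =>
    intro l1 h _ _
    rw [List.subperm_nil.mp h]
  | cons b l2' ih =>
    intro l1 h h1 h2
    cases l1 with
    | nil => exact List.nil_sublist _
    | cons a l1' =>
      by_cases hab : a = b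
      · subst hab
        exact List.Sublist.cons₂ a (ih ((List.subperm_cons a).mp h) h1.tail h2.tail)
      · have hba : b ≤ a := by
          have ha : a ∈ b :: l2' := h.subset List.mem_cons_self
          rcases List.mem_cons.mp ha with h' | h'
          · exact absurd h' hab
          · exact List.rel_of_pairwise_cons h2 h'
        have hlt : b < a := lt_of_le_of_ne hba (Ne.symm hab)
        have hsp : (a :: l1').Subperm l2' := by
          rw [List.subperm_ext_iff] at h ⊢
          intro x hx
          have hxa : a ≤ x := by
            rcases List.mem_cons.mp hx with h' | h'
            · exact h'.ge
            · exact List.rel_of_pairwise_cons h1 h'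
          have hxb : x ≠ b := by omega
          have hthis := h x hx
          have hc : List.count x (b :: l2') = List.count x l2' := by
            rw [List.count_cons]; simp [Ne.symm hxb]
          omega
        exact (ih hsp h1 h2.tail).cons b

theorem sublist_merge_left (le : Int → Int → Bool) :
    ∀ (l r : List Int), l.Sublist (l.merge r le) := by
  intro l
  induction l with
  | nil => intro r; exact List.nil_sublist _
  | cons a l ihl =>
    intro r
    induction r with
    | nil => simp
    | cons b r ihr =>
      rw [List.cons_merge_cons]
      split
      · exact List.Sublist.cons₂ a (ihl (b :: r))
      · exact (ihr).cons b

theorem merge_split {pre : List Int} : ∀ {c rest : List Int},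
    (∀ o ∈ pre, ∀ x ∈ c, o < x) →
    List.merge c (pre ++ rest) pvLe = pre ++ List.merge c rest pvLe := by
  induction pre with
  | nil => intro c rest _; simp
  | cons o pre ih =>
    intro c rest h
    cases c with
    | nil => simp
    | cons x c' =>
      have ho : o < x := h o List.mem_cons_self x List.mem_cons_self
      rw [List.cons_append, List.cons_merge_cons, if_neg (by simp [pvLe]; omega)]
      rw [ih (fun o' ho' x' hx' => h o' (List.mem_cons_of_mem _ ho') x' hx')]
      rfl

theorem merge_cons_left {b : Int} {c r : List Int} (h : ∀ o ∈ r.head?, b ≤ o) :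
    List.merge (b :: c) r pvLe = b :: List.merge c r pvLe := by
  cases r with
  | nil => simp
  | cons o r' =>
    rw [List.cons_merge_cons, if_pos (by simp [pvLe]; exact h o rfl)]

theorem merge_sorted {c r : List Int} (hc : List.Pairwise (· ≤ ·) c) (hr : List.Pairwise (· ≤ ·) r) :
    List.Pairwise (· ≤ ·) (List.merge c r pvLe) := by
  have := List.Pairwise.merge (r := (· ≤ · : Int → Int → Prop)) hc hr
  exact this

theorem merge_perm (c r : List Int) : (List.merge c r pvLe).Perm (c ++ r) :=
  List.merge_perm_append pvLe

theorem pvAdv_spec : ∀ (occ : List Int) (b : Int) (last : Option Int),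
    ∃ pre, occ = pre ++ (pvAdv occ b last).1 ∧ (∀ o ∈ pre, o ≤ b) ∧
      (pvAdv occ b last).2 = pre.getLast?.or last ∧
      (∀ o ∈ (pvAdv occ b last).1.head?, ¬ o ≤ b) := by
  intro occ
  induction occ with
  | nil => intro b last; exact ⟨[], by simp [pvAdv]⟩
  | cons o os ih =>
    intro b last
    by_cases hob : o ≤ b
    · obtain ⟨pre, h1, h2, h3, h4⟩ := ih b (some o)
      refine ⟨o :: pre, ?_, ?_, ?_, ?_⟩
      · simp [pvAdv, hob]; exact h1
      · intro o' ho'; rcases List.mem_cons.mp ho' with h' | h'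
        · omega
        · exact h2 o' h'
      · simp only [pvAdv, if_pos hob]
        rw [h3]
        cases pre with
        | nil => simp
        | cons p ps =>
          obtain ⟨g, hg⟩ := Option.isSome_iff_exists.mp ((List.getLast?_isSome (l := p :: ps)).mpr (by simp))
          simp [List.getLast?_cons_cons, hg]
      · simpa [pvAdv, hob] using h4
    · exact ⟨[], by simp [pvAdv, hob], by simp, by simp [pvAdv, hob], by simp [pvAdv, hob]; omega⟩

theorem pvGreedy_le_length (d : Int) : ∀ (av occ : List Int) (last : Option Int),
    pvGreedy d av occ last ≤ av.length := by
  intro av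
  induction av with
  | nil => intro occ last; simp [pvGreedy]
  | cons b bs ih =>
    intro occ last
    simp only [pvGreedy]
    split
    · simpa using ih _ _
    · exact le_trans (ih _ _) (Nat.le_succ _)

theorem mem_pvCombos : ∀ {l : List Int} {k : Nat} {c : List Int},
    c ∈ pvCombos l k ↔ c.Sublist l ∧ c.length = k := by
  intro l
  induction l with
  | nil =>
    intro k c
    cases k with
    | zero => simp [pvCombos, List.sublist_nil, List.length_eq_zero_iff]
    | succ k =>
      simp only [pvCombos, List.not_mem_nil, false_iff]
      rintro ⟨hs, hl⟩
      rw [List.sublist_nil] at hs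
      subst hs; simp at hl
  | cons x xs ih =>
    intro k c
    cases k with
    | zero =>
      simp only [pvCombos, List.mem_singleton]
      constructor
      · rintro rfl; exact ⟨List.nil_sublist _, rfl⟩
      · rintro ⟨_, hl⟩; exact List.length_eq_zero_iff.mp hl
    | succ k =>
      simp only [pvCombos, List.mem_append, List.mem_map]
      constructor
      · rintro (⟨t, ht, rfl⟩ | h)
        · obtain ⟨hs, hl⟩ := ih.mp ht
          exact ⟨List.Sublist.cons₂ x hs, by simp [hl]⟩
        · obtain ⟨hs, hl⟩ := ih.mp h
          exact ⟨hs.cons x, hl⟩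
      · rintro ⟨hs, hl⟩
        rcases List.sublist_cons_iff.mp hs with h | ⟨t, rfl, ht⟩
        · exact Or.inr (ih.mpr ⟨h, hl⟩)
        · exact Or.inl ⟨t, ih.mpr ⟨ht, by simpa using hl⟩, rfl⟩

theorem gaps_all_iff {s : List Int} {md : Int} :
    (∀ y ∈ pvGaps s, md ≤ y) ↔ List.IsChain (fun a b => a + md ≤ b) s := by
  rw [List.isChain_iff_getElem]
  unfold pvGaps
  constructor
  · intro h j hj
    have hmem : ((j : Int)) ∈ PySem.List.pyRange 0 ((s.length : Int) - 1) 1 :=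
      PySem.List.mem_pyRange_one.mpr ⟨by omega, by omega⟩
    have hy := h _ (List.mem_map.mpr ⟨(j : Int), hmem, rfl⟩)
    rw [PySem.List.pyGetD_eq_getElem s (i := (j : Int) + 1) 0 (by omega) (by omega),
        PySem.List.pyGetD_eq_getElem s (i := (j : Int)) 0 (by omega) (by omega)] at hy
    have e1 : ((j : Int) + 1).toNat = j + 1 := by omega
    have e2 : ((j : Int)).toNat = j := by omega
    simp only [e1, e2] at hy
    omega
  · intro h y hy
    obtain ⟨i, hi, rfl⟩ := List.mem_map.mp hy
    obtain ⟨h0, h1⟩ := PySem.List.mem_pyRange_one.mp hi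
    have hj : i.toNat + 1 < s.length := by omega
    have hc := h i.toNat hj
    rw [PySem.List.pyGetD_eq_getElem s (i := i + 1) 0 (by omega) (by omega),
        PySem.List.pyGetD_eq_getElem s (i := i) 0 (by omega) (by omega)]
    have e1 : (i + 1).toNat = i.toNat + 1 := by omega
    simp only [e1]
    omega

theorem pvCheck_iff {s : List Int} {md : Int} :
    pvCheck s md = true ↔ 2 ≤ s.length ∧ List.IsChain (fun a b => a + md ≤ b) s := by
  cases hm : PySem.List.min? (pvGaps s) (fun x => x) with
  | none =>
    have hnil := (PySem.List.min?_eq_none_iff _ _).mp hm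
    have hlen : (pvGaps s).length = 0 := by rw [hnil]; rfl
    unfold pvGaps at hlen
    rw [List.length_map, PySem.List.length_pyRange_one] at hlen
    simp only [pvCheck, hm]
    constructor
    · intro h; exact absurd h (by simp)
    · rintro ⟨h2, _⟩; omega
  | some m =>
    have hmem := PySem.List.min?_mem hm
    have hmin := PySem.List.min?_isMin hm
    have hpos : 0 < (pvGaps s).length := List.length_pos_of_mem hmem
    have hlen2 : 2 ≤ s.length := by
      unfold pvGaps at hpos
      rw [List.length_map, PySem.List.length_pyRange_one] at hpos
      omega
    simp only [pvCheck, hm, decide_eq_true_eq]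
    constructor
    · intro hmd
      exact ⟨hlen2, gaps_all_iff.mp (fun y hy => le_trans hmd (hmin y hy))⟩
    · rintro ⟨_, hch⟩
      exact gaps_all_iff.mpr hch m hmem

theorem zipAny_eq_false_iff {md : Int} : ∀ {l : List Int},
    ((l.zip l.tail).any (fun p => decide (p.2 - p.1 < md)) = false) ↔
      List.IsChain (fun a b => a + md ≤ b) l := by
  intro l
  induction l with
  | nil => simp
  | cons a l ih =>
    cases l with
    | nil => simp
    | cons b t =>
      rw [List.isChain_cons_cons, ← ih]
      simp only [List.tail_cons, List.zip_cons_cons, List.any_cons, Bool.or_eq_false_iff,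
        decide_eq_false_iff_not]
      constructor
      · rintro ⟨h1, h2⟩; exact ⟨by omega, h2⟩
      · rintro ⟨h1, h2⟩; exact ⟨by omega, h2⟩


theorem pvC_append_left {d : Int} {l₁ l₂ : List Int} (h : pvC d (l₁ ++ l₂)) : pvC d l₁ :=
  (List.isChain_append.mp h).1

theorem pvC_append_right {d : Int} {l₁ l₂ : List Int} (h : pvC d (l₁ ++ l₂)) : pvC d l₂ :=
  (List.isChain_append.mp h).2.1

theorem chain_optList {d : Int} (o : Option Int) : pvC d o.toList := by
  cases o with
  | none => exact List.IsChain.nil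
  | some a => exact List.isChain_singleton _

theorem pvC_opt_cons {d : Int} {o : Option Int} {l : List Int} :
    pvC d (o.toList ++ l) ↔ (∀ a ∈ o, ∀ y ∈ l.head?, pvR d a y) ∧ pvC d l := by
  cases o with
  | none => simp [pvC]
  | some a => simp [pvC, List.isChain_cons]

theorem optList_getLast? (o : Option Int) : o.toList.getLast? = o := by
  cases o <;> simp

theorem pvAdv_last_eq (occ pre : List Int) (b : Int) (last : Option Int)
    (hlast : (pvAdv occ b last).2 = pre.getLast?.or last) :
    (pvAdv occ b last).2.toList.getLast? = (last.toList ++ pre).getLast? := by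
  rw [List.getLast?_append, optList_getLast?, optList_getLast?]
  exact hlast

theorem pvTransfer {d : Int} {occ : List Int} {b : Int} {last : Option Int} {c : List Int}
    (hlt : ∀ o ∈ occ, o ≤ b → ∀ x ∈ c, o < x)
    (h : pvC d (last.toList ++ List.merge c occ pvLe)) :
    pvC d ((pvAdv occ b last).2.toList ++ List.merge c (pvAdv occ b last).1 pvLe) := by
  obtain ⟨pre, hsplit, hpre, hlast, hhd⟩ := pvAdv_spec occ b last
  have hms : List.merge c (pre ++ (pvAdv occ b last).1) pvLe
      = pre ++ List.merge c (pvAdv occ b last).1 pvLe :=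
    merge_split (fun o ho x hx => hlt o (hsplit ▸ List.mem_append_left _ ho) (hpre o ho) x hx)
  rw [hsplit, hms, ← List.append_assoc] at h
  obtain ⟨h1, h2, h3⟩ := List.isChain_append.mp h
  refine List.isChain_append.mpr ⟨chain_optList _, h2, ?_⟩
  intro x hx y hy
  exact h3 x (by rwa [pvAdv_last_eq occ pre b last hlast] at hx) y hy

theorem pvUntransfer {d : Int} {occ : List Int} {b : Int} {last : Option Int} {c : List Int}
    (hlt : ∀ o ∈ occ, o ≤ b → ∀ x ∈ c, o < x)
    (hInv : pvC d (last.toList ++ occ))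
    (h : pvC d ((pvAdv occ b last).2.toList ++ List.merge c (pvAdv occ b last).1 pvLe)) :
    pvC d (last.toList ++ List.merge c occ pvLe) := by
  obtain ⟨pre, hsplit, hpre, hlast, hhd⟩ := pvAdv_spec occ b last
  have hms : List.merge c (pre ++ (pvAdv occ b last).1) pvLe
      = pre ++ List.merge c (pvAdv occ b last).1 pvLe :=
    merge_split (fun o ho x hx => hlt o (hsplit ▸ List.mem_append_left _ ho) (hpre o ho) x hx)
  rw [hsplit, hms, ← List.append_assoc]
  obtain ⟨g1, g2, g3⟩ := List.isChain_append.mp h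
  refine List.isChain_append.mpr ⟨?_, g2, ?_⟩
  · have := hInv
    rw [hsplit, ← List.append_assoc] at this
    exact pvC_append_left this
  · intro x hx y hy
    exact g3 x (by rwa [pvAdv_last_eq occ pre b last hlast]) y hy

theorem greedy_ub (d : Int) : ∀ (av occ : List Int) (last : Option Int) (c : List Int),
    List.Pairwise (· ≤ ·) av → List.Pairwise (· ≤ ·) occ →
    (∀ x ∈ av, ∀ o ∈ occ, x ≠ o) →
    c.Sublist av → pvC d (last.toList ++ List.merge c occ pvLe) →
    c.length ≤ pvGreedy d av occ last := by
  intro av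
  induction av with
  | nil =>
    intro occ last c _ _ _ hsub _
    simp [List.sublist_nil.mp hsub, pvGreedy]
  | cons b bs ih =>
    intro occ last c hav hocc hdisj hsub hch
    obtain ⟨pre, hsplit, hpre, hlast, hhd⟩ := pvAdv_spec occ b last
    have hoccsub : (pvAdv occ b last).1.Sublist occ := by
      conv_rhs => rw [hsplit]
      exact List.sublist_append_right pre _
    have hocc' : List.Pairwise (· ≤ ·) (pvAdv occ b last).1 := hocc.sublist hoccsub
    have hgtb : ∀ o ∈ (pvAdv occ b last).1, b < o := by
      intro o ho
      cases hh : (pvAdv occ b last).1 with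
      | nil => rw [hh] at ho; simp at ho
      | cons h t =>
        have hhb : ¬ h ≤ b := hhd h (by simp [hh])
        rw [hh] at ho
        rcases List.mem_cons.mp ho with rfl | h'
        · omega
        · have : h ≤ o := List.rel_of_pairwise_cons (hh ▸ hocc') h'
          omega
    have hbbs : ∀ x ∈ bs, b ≤ x := fun x hx => List.rel_of_pairwise_cons hav hx
    have havbs : List.Pairwise (· ≤ ·) bs := (List.pairwise_cons.mp hav).2
    have hdisj' : ∀ x ∈ bs, ∀ o ∈ (pvAdv occ b last).1, x ≠ o :=
      fun x hx o ho => hdisj x (List.mem_cons_of_mem _ hx) o (hoccsub.subset ho)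
    have hcin : ∀ x ∈ c, b ≤ x := by
      intro x hx
      rcases List.mem_cons.mp (hsub.subset hx) with rfl | h'
      · exact le_refl x
      · exact hbbs x h'
    have hlt : ∀ o ∈ occ, o ≤ b → ∀ x ∈ c, o < x :=
      fun o ho hob x hx =>
        lt_of_le_of_ne (le_trans hob (hcin x hx)) (Ne.symm (hdisj x (hsub.subset hx) o ho))
    have hch' := pvTransfer hlt hch
    simp only [pvGreedy]
    cases c with
    | nil => split <;> simp
    | cons x c'' =>
      have hc''bs : c''.Sublist bs := by
        rcases List.sublist_cons_iff.mp hsub with h | ⟨t, ht, h⟩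
        · exact (List.sublist_cons_self x c'').trans h
        · injection ht with h1 h2; subst h1; subst h2; exact h
      have hsortc : List.Pairwise (· ≤ ·) (x :: c'') := hav.sublist hsub
      by_cases hcond : (((pvAdv occ b last).2.all fun a => decide (a + d ≤ b)) &&
          ((pvAdv occ b last).1.head?.all fun o => decide (b + d ≤ o))) = true
      · rw [if_pos hcond]
        rw [Bool.and_eq_true] at hcond
        obtain ⟨hc1, hc2⟩ := hcond
        have hkey : c''.length ≤ pvGreedy d bs (pvAdv occ b last).1 (some b) := by
          apply ih (pvAdv occ b last).1 (some b) c'' havbs hocc' hdisj' hc''bs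
          have hchR : pvC d (List.merge (x :: c'') (pvAdv occ b last).1 pvLe) :=
            pvC_append_right hch'
          have hxc : List.Pairwise (pvR d) (x :: c'') :=
            (pvC_pairwise hchR).sublist (sublist_merge_left _ _ _)
          have hmm : pvC d (List.merge c'' (pvAdv occ b last).1 pvLe) := by
            apply pvC_sublist ?_ hchR
            apply sorted_subperm_sublist ?_
              (merge_sorted (havbs.sublist hc''bs) hocc') (merge_sorted hsortc hocc')
            have h1 : (c'' ++ (pvAdv occ b last).1).Subperm
                (List.merge (x :: c'') (pvAdv occ b last).1 pvLe) :=
              (((List.sublist_cons_self x c'').append_right _).subperm).trans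
                (merge_perm (x :: c'') _).symm.subperm
            exact (merge_perm c'' _).subperm.trans h1
          refine pvC_opt_cons.mpr ⟨?_, hmm⟩
          intro a ha y hy
          rw [Option.mem_some_iff] at ha
          subst ha
          have hymem : y ∈ List.merge c'' (pvAdv occ b last).1 pvLe := List.mem_of_mem_head? hy
          rcases List.mem_append.mp ((merge_perm c'' _).subset hymem) with hyc | hyo
          · have hxy := List.rel_of_pairwise_cons hxc hyc
            have hbx : b ≤ x := hcin x List.mem_cons_self
            exact ⟨le_trans hbx hxy.1, by rcases hxy.2 with h' | h' <;> omega⟩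
          · cases hh1 : (pvAdv occ b last).1 with
            | nil => rw [hh1] at hyo; simp at hyo
            | cons h0 t0 =>
              rw [hh1] at hc2 hyo
              simp only [List.head?_cons, Option.all_some, decide_eq_true_eq] at hc2
              have hh0y : h0 ≤ y := by
                rcases List.mem_cons.mp hyo with rfl | h'
                · exact le_refl y
                · exact List.rel_of_pairwise_cons (hh1 ▸ hocc') h'
              exact ⟨(hgtb y (hh1 ▸ hyo)).le, Or.inr (by omega)⟩
        simpa using Nat.succ_le_succ hkey
      · rw [if_neg hcond]
        rcases List.sublist_cons_iff.mp hsub with hcb | ⟨t, hteq, htbs⟩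
        · exact ih (pvAdv occ b last).1 (pvAdv occ b last).2 (x :: c'') havbs hocc' hdisj' hcb hch'
        · exfalso
          apply hcond
          injection hteq with h1 h2
          have h1s := h1.symm
          subst h1s; subst h2
          have hm : List.merge (b :: c'') (pvAdv occ b last).1 pvLe
              = b :: List.merge c'' (pvAdv occ b last).1 pvLe :=
            merge_cons_left (fun o ho => (hgtb o (List.mem_of_mem_head? ho)).le)
          rw [hm] at hch'
          rw [Bool.and_eq_true]
          constructor
          · cases hl2 : (pvAdv occ b last).2 with
            | none => rfl
            | some a =>
              have hlink := (List.isChain_append.mp hch').2.2 a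
                (by simp [hl2]) b (by simp)
              simp only [Option.all_some, decide_eq_true_eq]
              rcases hlink with ⟨h1', h2' | h2'⟩ <;> omega
          · cases hh1 : (pvAdv occ b last).1 with
            | nil => rfl
            | cons h0 t0 =>
              have hchain2 : pvC d (b :: List.merge c'' (pvAdv occ b last).1 pvLe) :=
                pvC_append_right hch'
              have hmem0 : h0 ∈ List.merge c'' (pvAdv occ b last).1 pvLe :=
                (merge_perm c'' _).symm.subset (List.mem_append_right _ (hh1 ▸ List.mem_cons_self))
              have hrel := List.rel_of_pairwise_cons (pvC_pairwise hchain2) hmem0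
              simp only [List.head?_cons, Option.all_some, decide_eq_true_eq]
              rcases hrel with ⟨h1', h2' | h2'⟩ <;> omega

theorem greedy_lb (d : Int) : ∀ (av occ : List Int) (last : Option Int),
    List.Pairwise (· ≤ ·) av → List.Pairwise (· ≤ ·) occ →
    (∀ x ∈ av, ∀ o ∈ occ, x ≠ o) →
    (∀ a, last = some a → ∀ x ∈ av, a ≤ x) →
    pvC d (last.toList ++ occ) →
    ∃ c, c.Sublist av ∧ c.length = pvGreedy d av occ last ∧
      pvC d (last.toList ++ List.merge c occ pvLe) := by
  intro av
  induction av with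
  | nil =>
    intro occ last _ _ _ _ hInv
    exact ⟨[], List.nil_sublist _, rfl, by simpa [List.nil_merge] using hInv⟩
  | cons b bs ih =>
    intro occ last hav hocc hdisj hlastle hInv
    obtain ⟨pre, hsplit, hpre, hlast, hhd⟩ := pvAdv_spec occ b last
    have hoccsub : (pvAdv occ b last).1.Sublist occ := by
      conv_rhs => rw [hsplit]
      exact List.sublist_append_right pre _
    have hocc' : List.Pairwise (· ≤ ·) (pvAdv occ b last).1 := hocc.sublist hoccsub
    have hgtb : ∀ o ∈ (pvAdv occ b last).1, b < o := by
      intro o ho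
      cases hh : (pvAdv occ b last).1 with
      | nil => rw [hh] at ho; simp at ho
      | cons h t =>
        have hhb : ¬ h ≤ b := hhd h (by simp [hh])
        rw [hh] at ho
        rcases List.mem_cons.mp ho with rfl | h'
        · omega
        · have : h ≤ o := List.rel_of_pairwise_cons (hh ▸ hocc') h'
          omega
    have hbbs : ∀ x ∈ bs, b ≤ x := fun x hx => List.rel_of_pairwise_cons hav hx
    have havbs : List.Pairwise (· ≤ ·) bs := (List.pairwise_cons.mp hav).2
    have hdisj' : ∀ x ∈ bs, ∀ o ∈ (pvAdv occ b last).1, x ≠ o :=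
      fun x hx o ho => hdisj x (List.mem_cons_of_mem _ hx) o (hoccsub.subset ho)
    have hInv' : pvC d ((pvAdv occ b last).2.toList ++ (pvAdv occ b last).1) := by
      have := pvTransfer (d := d) (c := ([] : List Int)) (occ := occ) (b := b) (last := last)
        (by simp) (by simpa [List.nil_merge] using hInv)
      simpa [List.nil_merge] using this
    have hlast'b : ∀ a, (pvAdv occ b last).2 = some a → a ≤ b := by
      intro a ha
      rw [hlast] at ha
      cases hp : pre.getLast? with
      | some g =>
        rw [hp] at ha
        simp only [Option.some_or, Option.some.injEq] at ha
        subst ha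
        exact hpre g (List.mem_of_getLast? hp)
      | none =>
        rw [hp] at ha
        simp only [Option.none_or] at ha
        exact hlastle a ha b List.mem_cons_self
    simp only [pvGreedy]
    by_cases hcond : (((pvAdv occ b last).2.all fun a => decide (a + d ≤ b)) &&
        ((pvAdv occ b last).1.head?.all fun o => decide (b + d ≤ o))) = true
    · rw [if_pos hcond]
      rw [Bool.and_eq_true] at hcond
      obtain ⟨hc1, hc2⟩ := hcond
      have hInv2 : pvC d ((some b : Option Int).toList ++ (pvAdv occ b last).1) := by
        refine pvC_opt_cons.mpr ⟨?_, pvC_append_right hInv'⟩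
        intro a ha y hy
        rw [Option.mem_some_iff] at ha
        subst ha
        have hym := List.mem_of_mem_head? hy
        cases hh1 : (pvAdv occ b last).1 with
        | nil => rw [hh1] at hym; simp at hym
        | cons h0 t0 =>
          rw [hh1] at hc2 hy
          simp only [List.head?_cons, Option.all_some, decide_eq_true_eq] at hc2
          simp only [List.head?_cons, Option.mem_some_iff] at hy
          have hym2 : y ∈ (pvAdv occ b last).1 := by rw [hh1, hy]; exact List.mem_cons_self
          exact ⟨(hgtb y hym2).le, Or.inr (by omega)⟩
      obtain ⟨c', hsub', hlen', hch'⟩ := ih (pvAdv occ b last).1 (some b) havbs hocc' hdisj'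
        (by intro a ha x hx; injection ha with ha; subst ha; exact hbbs x hx) hInv2
      have hm : List.merge (b :: c') (pvAdv occ b last).1 pvLe
          = b :: List.merge c' (pvAdv occ b last).1 pvLe :=
        merge_cons_left (fun o ho => (hgtb o (List.mem_of_mem_head? ho)).le)
      have hful : pvC d ((pvAdv occ b last).2.toList ++
          List.merge (b :: c') (pvAdv occ b last).1 pvLe) := by
        rw [hm]
        refine pvC_opt_cons.mpr ⟨?_, by simpa using hch'⟩
        intro a ha y hy
        rw [Option.mem_def] at ha
        simp only [List.head?_cons, Option.mem_some_iff] at hy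
        rw [ha] at hc1
        simp only [Option.all_some, decide_eq_true_eq] at hc1
        exact ⟨hy ▸ hlast'b a ha, Or.inr (hy ▸ hc1)⟩
      refine ⟨b :: c', List.Sublist.cons₂ b hsub', by simp [hlen'], ?_⟩
      apply pvUntransfer ?_ hInv hful
      intro o ho hob x hx
      rcases List.mem_cons.mp hx with rfl | h'
      · exact lt_of_le_of_ne hob (Ne.symm (hdisj x List.mem_cons_self o ho))
      · exact lt_of_le_of_ne (le_trans hob (hbbs x (hsub'.subset h')))
          (Ne.symm (hdisj x (List.mem_cons_of_mem _ (hsub'.subset h')) o ho))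
    · rw [if_neg hcond]
      obtain ⟨c', hsub', hlen', hch'⟩ := ih (pvAdv occ b last).1 (pvAdv occ b last).2 havbs hocc'
        hdisj' (fun a ha x hx => le_trans (hlast'b a ha) (hbbs x hx)) hInv'
      refine ⟨c', hsub'.cons b, hlen', ?_⟩
      apply pvUntransfer ?_ hInv hch'
      intro o ho hob x hx
      exact lt_of_le_of_ne (le_trans hob (hbbs x (hsub'.subset hx)))
        (Ne.symm (hdisj x (List.mem_cons_of_mem _ (hsub'.subset hx)) o ho))


theorem exists_iff_greedy (md : Int) (av occ : List Int) (k : Nat)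
    (hav : List.Pairwise (· ≤ ·) av) (hocc : List.Pairwise (· ≤ ·) occ)
    (hdisj : ∀ x ∈ av, ∀ o ∈ occ, x ≠ o) (hOccCh : pvC md occ) :
    (∃ c', c'.Sublist av ∧ c'.length = k ∧ pvC md (List.merge c' occ pvLe)) ↔
      k ≤ pvGreedy md av occ none := by
  constructor
  · rintro ⟨c', hsub, hlen, hch⟩
    have := greedy_ub md av occ none c' hav hocc hdisj hsub (by simpa using hch)
    omega
  · intro hk
    obtain ⟨c, hsub, hlen, hch⟩ := greedy_lb md av occ none hav hocc hdisj
      (by simp) (by simpa using hOccCh)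
    refine ⟨c.take k, (List.take_sublist k c).trans hsub, ?_, ?_⟩
    · rw [List.length_take]; omega
    · have hchm : pvC md (List.merge c occ pvLe) := by simpa using hch
      apply pvC_sublist ?_ hchm
      apply sorted_subperm_sublist ?_
        (merge_sorted (hav.sublist ((List.take_sublist k c).trans hsub)) hocc)
        (merge_sorted (hav.sublist hsub) hocc)
      exact (merge_perm _ _).subperm.trans
        ((((List.take_sublist k c).append_right occ).subperm).trans (merge_perm c occ).symm.subperm)

theorem filter_eq_bridge (bc ob : List Int) :
    bc.filter (fun bed => !(PySem.Set.contains (PySem.Set.ofList ob) bed)) =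
      bc.filter (fun b => decide (b ∉ ob)) := by
  apply List.filter_congr
  intro b _
  by_cases h : b ∈ ob
  · simp [h, (PySem.Set.contains_iff _ _).mpr ((PySem.Set.mem_ofList _ _).mpr h)]
  · have hc : PySem.Set.contains (PySem.Set.ofList ob) b = false := by
      rw [← Bool.not_eq_true]
      intro hcc
      exact h ((PySem.Set.mem_ofList _ _).mp ((PySem.Set.contains_iff _ _).mp hcc))
    simp [h, hc]

theorem sorted_eq_of_perm_pw {l₁ l₂ : List Int} (hp : l₁.Perm l₂)
    (h1 : List.Pairwise (· ≤ ·) l₁) (h2 : List.Pairwise (· ≤ ·) l₂) : l₁ = l₂ :=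
  List.Perm.eq_of_pairwise (fun a b _ _ hab hba => le_antisymm hab hba) h1 h2 hp

theorem alt_shape (n : Int) (bc ob : List Int) (md : Int) :
    can_place_entities_naive_alt n bc ob md =
      (if ((PySem.List.sorted ob (fun x => x)).zip (PySem.List.sorted ob (fun x => x)).tail).any
            (fun p => decide (p.2 - p.1 < md)) then false
       else decide (n ≤ (pvGreedy md
          (PySem.List.sorted (bc.filter (fun b => decide (b ∉ ob))) (fun x => x))
          (PySem.List.sorted ob (fun x => x)) none : Int))) := by
  simp only [can_place_entities_naive_alt, filter_eq_bridge]

theorem a_shape (n : Int) (bc ob : List Int) (md : Int) :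
    (can_place_entities_naive n bc ob md = true) ↔
      ∃ c, c.Sublist (bc.filter (fun b => decide (b ∉ ob))) ∧ c.length = n.toNat ∧
        pvCheck (PySem.List.sorted (c ++ ob) (fun x => x)) md = true := by
  simp only [can_place_entities_naive]
  rw [filter_eq_bridge, List.any_eq_true]
  constructor
  · rintro ⟨c, hc, hch⟩
    obtain ⟨h1, h2⟩ := mem_pvCombos.mp hc
    exact ⟨c, h1, h2, hch⟩
  · rintro ⟨c, h1, h2, hch⟩
    exact ⟨c, mem_pvCombos.mpr ⟨h1, h2⟩, hch⟩

-- ===== VERDICT (by name: the statement is the Claim_ definition above) =====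
theorem can_place_entities_naive_spec : Claim_equal_can_place_entities_naive := by
  intro n bc ob md _ hpre
  obtain ⟨hn0, hpre2⟩ := hpre
  unfold Spec_can_place_entities_naive
  rw [alt_shape]
  set k := n.toNat with hk
  have hkn : (k : Int) = n := Int.toNat_of_nonneg hn0
  set availL := bc.filter (fun b => decide (b ∉ ob)) with havL
  set av := PySem.List.sorted availL (fun x => x) with hav
  set occ := PySem.List.sorted ob (fun x => x) with hocc
  have hSpw : ∀ l : List Int, List.Pairwise (· ≤ ·) (PySem.List.sorted l (fun x => x)) :=
    fun l => by simpa using PySem.List.sorted_pairwise l (fun x => x)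
  have havPW : List.Pairwise (· ≤ ·) av := hSpw availL
  have hoccPW : List.Pairwise (· ≤ ·) occ := hSpw ob
  have havperm : av.Perm availL := PySem.List.sorted_perm _ _ _
  have hoccperm : occ.Perm ob := PySem.List.sorted_perm _ _ _
  have hmemav : ∀ x ∈ av, x ∉ ob := by
    intro x hx
    have hmf : x ∈ availL := havperm.subset hx
    rw [havL] at hmf
    simpa using List.of_mem_filter hmf
  have hdisj : ∀ x ∈ av, ∀ o ∈ occ, x ≠ o :=
    fun x hx o ho he => (hmemav x hx) (he ▸ hoccperm.subset ho)
  by_cases hgap : (((occ.zip occ.tail).any (fun p => decide (p.2 - p.1 < md))) = true)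
  · rw [if_pos hgap]
    cases hAval : can_place_entities_naive n bc ob md with
    | false => rfl
    | true =>
      exfalso
      obtain ⟨c, hsub, hlen, hch⟩ := (a_shape n bc ob md).mp hAval
      obtain ⟨_, hchain⟩ := pvCheck_iff.mp hch
      have hpvc : pvC md (PySem.List.sorted (c ++ ob) (fun x => x)) :=
        pvC_of_gap (hSpw _) hchain
      have hoccsub : occ.Sublist (PySem.List.sorted (c ++ ob) (fun x => x)) := by
        apply sorted_subperm_sublist ?_ hoccPW (hSpw _)
        exact hoccperm.subperm.trans ((List.sublist_append_right c ob).subperm.trans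
          (PySem.List.sorted_perm (c ++ ob) (fun x => x) false).symm.subperm)
      have hfin := zipAny_eq_false_iff.mpr (gap_of_pvC (pvC_sublist hoccsub hpvc))
      rw [hgap] at hfin
      exact Bool.true_eq_false.mp hfin
  · rw [if_neg hgap]
    have hgap' : ((occ.zip occ.tail).any (fun p => decide (p.2 - p.1 < md))) = false := by
      revert hgap
      cases ((occ.zip occ.tail).any (fun p => decide (p.2 - p.1 < md))) <;> simp
    have hOccCh : pvC md occ := pvC_of_gap hoccPW (zipAny_eq_false_iff.mp hgap')
    have hglen := pvGreedy_le_length md av occ none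
    have havlen : av.length = availL.length := havperm.length_eq
    by_cases hsmall : availL.length < k
    · have hAfalse : can_place_entities_naive n bc ob md = false := by
        cases hAval : can_place_entities_naive n bc ob md with
        | false => rfl
        | true =>
          exfalso
          obtain ⟨c, hsub, hlen, _⟩ := (a_shape n bc ob md).mp hAval
          rw [← havL] at hsub
          rw [← hk] at hlen
          have := hsub.length_le
          omega
      rw [hAfalse]
      symm
      rw [decide_eq_false_iff_not]
      omega
    · have h2len : 2 ≤ (k : Int) + (ob.length : Int) := by
        rcases hpre2 with h | h
        · omega
        · omega
      have hiff : (∃ c, c.Sublist availL ∧ c.length = k ∧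
          pvCheck (PySem.List.sorted (c ++ ob) (fun x => x)) md = true) ↔
          (k ≤ pvGreedy md av occ none) := by
        rw [← exists_iff_greedy md av occ k havPW hoccPW hdisj hOccCh]
        constructor
        · rintro ⟨c, hsub, hlen, hch⟩
          obtain ⟨_, hchain⟩ := pvCheck_iff.mp hch
          have hcpw : List.Pairwise (· ≤ ·) (PySem.List.sorted c (fun x => x)) := hSpw c
          have hc'sub : (PySem.List.sorted c (fun x => x)).Sublist av := by
            apply sorted_subperm_sublist ?_ hcpw havPW
            exact (PySem.List.sorted_perm c (fun x => x) false).subperm.trans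
              (hsub.subperm.trans havperm.symm.subperm)
          have hSeq : PySem.List.sorted (c ++ ob) (fun x => x) =
              List.merge (PySem.List.sorted c (fun x => x)) occ pvLe := by
            apply sorted_eq_of_perm_pw ?_ (hSpw _) (merge_sorted hcpw hoccPW)
            exact (PySem.List.sorted_perm (c ++ ob) (fun x => x) false).trans
              (((PySem.List.sorted_perm c (fun x => x) false).symm.append
                hoccperm.symm).trans (merge_perm _ occ).symm)
          refine ⟨PySem.List.sorted c (fun x => x), hc'sub, ?_, ?_⟩
          · rw [(PySem.List.sorted_perm c (fun x => x) false).length_eq]; exact hlen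
          · rw [← hSeq]; exact pvC_of_gap (hSpw _) hchain
        · rintro ⟨c', hsub', hlen', hch'⟩
          obtain ⟨c, hcp, hcsub⟩ := hsub'.subperm.trans havperm.subperm
          have hcpw : List.Pairwise (· ≤ ·) c' := havPW.sublist hsub'
          have hSeq : PySem.List.sorted (c ++ ob) (fun x => x) = List.merge c' occ pvLe := by
            apply sorted_eq_of_perm_pw ?_ (hSpw _) (merge_sorted hcpw hoccPW)
            exact (PySem.List.sorted_perm (c ++ ob) (fun x => x) false).trans
              ((hcp.append hoccperm.symm).trans (merge_perm c' occ).symm)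
          refine ⟨c, hcsub, by rw [hcp.length_eq]; exact hlen', ?_⟩
          rw [pvCheck_iff]
          constructor
          · have : (PySem.List.sorted (c ++ ob) (fun x => x)).length = c.length + ob.length := by
              rw [(PySem.List.sorted_perm (c ++ ob) (fun x => x) false).length_eq,
                List.length_append]
            have hclen : c.length = k := by rw [hcp.length_eq]; exact hlen'
            omega
          · rw [hSeq]; exact gap_of_pvC hch'
      have hmain : (can_place_entities_naive n bc ob md = true) ↔
          (decide (n ≤ (pvGreedy md av occ none : Int)) = true) := by
        rw [a_shape, decide_eq_true_eq, ← hk, ← havL, hiff]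
        omega
      cases hAval : can_place_entities_naive n bc ob md with
      | true => exact (hmain.mp hAval).symm
      | false =>
        symm
        rw [← Bool.not_eq_true]
        intro hdec
        rw [← hmain] at hdec
        rw [hAval] at hdec
        exact Bool.false_ne_true hdec

@[simp] theorem can_place_entities_naive_raises : Claim_raises_can_place_entities_naive := by
  unfold Claim_raises_can_place_entities_naive
  constructor
  · intro n bc ob md _ hr
    unfold Raises_can_place_entities_naive at hr
    unfold Pre_can_place_entities_naive
    rcases hr with h | ⟨h1, h2, h3⟩ <;> intro ⟨hp1, hp2⟩ <;> [omega; (rcases hp2 with h4 | h4 <;> omega)]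
  · refine ⟨by decide, by decide, by decide⟩
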